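-- pv_equiv track=rewrite | github.com/c1508213670/Compilation_principle_and_Practice1 | SLR/SLR.py | d_gram
-- ===== SOURCE A (Python) =====
-- def d_gram(lst):
--     resls=[]
--     for i in lst:
--         temp=[]
--         for j in range(len(i)):
--             if j==0:
--                 temp.append(i[0])
--                 continue
--             if i[j]=="|":
--                 resls.append(temp)
--                 temp=[]
--                 temp.append(i[0])
--                 temp.append('->')
--             else:
--                 temp.append(i[j])
--         resls.append(temp)
--     return resls
-- ===== SOURCE B (Python) =====
-- def d_gram(lst):
--     out = []
--     for i in lst:
--         if not i:
--             out.append([])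
--             continue
--         head, rest = i[0], i[1:]
--         segs = []
--         while "|" in rest:
--             k = rest.index("|")
--             segs.append(rest[:k])
--             rest = rest[k + 1:]
--         segs.append(rest)
--         out.append([head] + segs[0])
--         out.extend([head, "->"] + s for s in segs[1:])
--     return out
-- ===== Notes on version B (the rewrite author's own statement) =====
-- stated objective: alternative
-- what changed: Replaces A's element-by-element state machine (a running temp list flushed into the result on each '|') with an index/slice-based split: each rule's tail is cut into segments at successive .index('|') positions, and the segments are then formatted into productions.
import Mathlib
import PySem

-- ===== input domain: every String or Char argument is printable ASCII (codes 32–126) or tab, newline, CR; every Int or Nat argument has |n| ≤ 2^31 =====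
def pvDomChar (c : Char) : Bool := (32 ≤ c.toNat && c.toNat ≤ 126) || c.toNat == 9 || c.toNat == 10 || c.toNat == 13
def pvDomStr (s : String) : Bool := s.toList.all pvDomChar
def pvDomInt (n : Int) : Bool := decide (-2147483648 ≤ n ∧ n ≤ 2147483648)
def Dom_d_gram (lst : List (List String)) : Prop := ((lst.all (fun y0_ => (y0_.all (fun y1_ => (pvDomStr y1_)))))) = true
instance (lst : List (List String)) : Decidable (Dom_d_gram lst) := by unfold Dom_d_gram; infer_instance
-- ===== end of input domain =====

-- B replaces A's character-by-character state machine (running temp flushed on '|') by an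
-- index/slice-based split of each rule's tail into segments, then formats the segments; same results.

-- ===== PORT A =====
-- A's `for j in range(len(i))` with in-range accesses i[j] is ported as a fold over
-- PySem.List.enumerate i 0 (exact: j always in range); i[0] is i.headD "" (only read when i ≠ []).
def d_gram (lst : List (List String)) : List (List String) :=
  lst.foldl (fun resls i =>
    let st := (PySem.List.enumerate i 0).foldl
      (fun (st : List (List String) × List String) jx =>
        if jx.1 = 0 then (st.1, st.2 ++ [i.headD ""])
        else if jx.2 = "|" then (st.1 ++ [st.2], [i.headD "", "->"])
        else (st.1, st.2 ++ [jx.2]))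
      (resls, [])
    st.1 ++ [st.2]) []

-- ===== PORT B =====
-- Source B's while-loop splitting `rest` at successive rest.index("|") positions.
def splitBar (rest : List String) : List (List String) :=
  if h : "|" ∈ rest then
    rest.take (rest.idxOf "|") :: splitBar (rest.drop (rest.idxOf "|" + 1))
  else [rest]
termination_by rest.length
decreasing_by
  simp only [List.length_drop]
  have := List.idxOf_lt_length_of_mem h
  omega

-- segs[0] in Source B: segs (= splitBar rest) is always nonempty, so headD [] is exact.
def d_gram_alt (lst : List (List String)) : List (List String) :=
  lst.foldl (fun out i =>
    match i with
    | [] => out ++ [[]]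
    | head :: rest =>
      let segs := splitBar rest
      (out ++ [[head] ++ segs.headD []]) ++ (segs.drop 1).map (fun s => [head, "->"] ++ s)) []

-- ===== PRECONDITION & SPEC =====
def Spec_d_gram (lst : List (List String)) (out : List (List String)) : Prop := out = d_gram_alt lst
instance (lst : List (List String)) (out : List (List String)) : Decidable (Spec_d_gram lst out) := by unfold Spec_d_gram; infer_instance

-- ===== CLAIM (what is proved, stated in full; the proofs are below) =====
def Claim_equal_d_gram : Prop := ∀ (lst : List (List String)), Dom_d_gram lst → Spec_d_gram lst (d_gram lst)

-- ===== LEMMAS AND PROOFS =====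

-- scan: A's inner loop after the j = 0 step, as a structural recursion on the tail.
def scan (head : String) : List String → List (List String) → List String → List (List String) × List String
  | [], acc, temp => (acc, temp)
  | x :: xs, acc, temp =>
    if x = "|" then scan head xs (acc ++ [temp]) [head, "->"] else scan head xs acc (temp ++ [x])

lemma splitBar_ne_nil (t : List String) : splitBar t ≠ [] := by
  unfold splitBar; split <;> simp

lemma splitBar_nil : splitBar [] = [[]] := by
  unfold splitBar; simp

lemma splitBar_bar (xs : List String) : splitBar ("|" :: xs) = [] :: splitBar xs := by
  rw [splitBar]
  simp [List.idxOf_cons_self]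

lemma splitBar_cons_ne (x : String) (xs : List String) (hx : x ≠ "|") :
    splitBar (x :: xs) = (x :: (splitBar xs).headD []) :: (splitBar xs).drop 1 := by
  by_cases h : "|" ∈ xs
  · rw [splitBar]
    have hmem : "|" ∈ x :: xs := List.mem_cons_of_mem _ h
    have hidx : (x :: xs).idxOf "|" = xs.idxOf "|" + 1 := List.idxOf_cons_ne xs hx
    rw [dif_pos hmem, hidx]
    conv_rhs => rw [splitBar, dif_pos h]
    simp
  · have hmem : "|" ∉ x :: xs := by
      simp [List.mem_cons, Ne.symm hx, h]
    rw [splitBar, dif_neg hmem]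
    conv_rhs => rw [splitBar, dif_neg h]
    simp

lemma scan_splitBar (head : String) (t : List String) :
    ∀ (acc : List (List String)) (temp : List String),
    (scan head t acc temp).1 ++ [(scan head t acc temp).2] =
      acc ++ [temp ++ (splitBar t).headD []] ++
        ((splitBar t).drop 1).map (fun s => [head, "->"] ++ s) := by
  induction t with
  | nil => intro acc temp; simp [scan, splitBar_nil]
  | cons x xs ih =>
    intro acc temp
    by_cases hx : x = "|"
    · subst hx
      rw [show scan head ("|" :: xs) acc temp = scan head xs (acc ++ [temp]) [head, "->"] from by
        simp [scan]]
      rw [splitBar_bar, ih]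
      obtain ⟨s0, ss, hss⟩ : ∃ s0 ss, splitBar xs = s0 :: ss := by
        cases h : splitBar xs with
        | nil => exact absurd h (splitBar_ne_nil xs)
        | cons a b => exact ⟨a, b, rfl⟩
      simp [hss, List.append_assoc]
    · simp only [scan, if_neg hx]
      rw [ih, splitBar_cons_ne x xs hx]
      simp

-- A's inner fold over the shifted enumeration (all indices ≥ 1, so the j = 0 branch never fires) is scan.
lemma foldA_tail (head : String) :
    ∀ (t : List String) (s : Int), 0 < s →
    ∀ (acc : List (List String)) (temp : List String),
    (PySem.List.enumerate t s).foldl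
      (fun (st : List (List String) × List String) jx =>
        if jx.1 = 0 then (st.1, st.2 ++ [head])
        else if jx.2 = "|" then (st.1 ++ [st.2], [head, "->"])
        else (st.1, st.2 ++ [jx.2])) (acc, temp) =
      scan head t acc temp := by
  intro t
  induction t with
  | nil => intro s hs acc temp; simp [PySem.List.enumerate_nil, scan]
  | cons x xs ih =>
    intro s hs acc temp
    have hs0 : ¬ (s = 0) := by omega
    rw [PySem.List.enumerate_cons, List.foldl_cons]
    simp only [if_neg hs0]
    by_cases hx : x = "|"
    · subst hx
      rw [if_pos rfl, ih (s + 1) (by omega)]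
      simp [scan]
    · rw [if_neg hx, ih (s + 1) (by omega)]
      simp [scan, hx]

-- The two per-row bodies agree.
lemma body_eq (resls : List (List String)) (i : List String) :
    (let st := (PySem.List.enumerate i 0).foldl
        (fun (st : List (List String) × List String) jx =>
          if jx.1 = 0 then (st.1, st.2 ++ [i.headD ""])
          else if jx.2 = "|" then (st.1 ++ [st.2], [i.headD "", "->"])
          else (st.1, st.2 ++ [jx.2])) (resls, []);
      st.1 ++ [st.2]) =
    (match i with
     | [] => resls ++ [[]]
     | head :: rest =>
       let segs := splitBar rest
       (resls ++ [[head] ++ segs.headD []]) ++ (segs.drop 1).map (fun s => [head, "->"] ++ s)) := by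
  cases i with
  | nil => simp [PySem.List.enumerate_nil]
  | cons h t =>
    rw [PySem.List.enumerate_cons, List.foldl_cons]
    simp only [List.headD_cons, List.nil_append, reduceIte]
    rw [foldA_tail h t (0 + 1) (by omega)]
    rw [scan_splitBar]

lemma folds_eq (lst : List (List String)) :
    ∀ (acc : List (List String)),
    lst.foldl (fun resls i =>
      let st := (PySem.List.enumerate i 0).foldl
        (fun (st : List (List String) × List String) jx =>
          if jx.1 = 0 then (st.1, st.2 ++ [i.headD ""])
          else if jx.2 = "|" then (st.1 ++ [st.2], [i.headD "", "->"])
          else (st.1, st.2 ++ [jx.2])) (resls, [])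
      st.1 ++ [st.2]) acc =
    lst.foldl (fun out i =>
      match i with
      | [] => out ++ [[]]
      | head :: rest =>
        let segs := splitBar rest
        (out ++ [[head] ++ segs.headD []]) ++ (segs.drop 1).map (fun s => [head, "->"] ++ s)) acc := by
  intro acc
  apply PySem.List.foldl_congr_mem
  intro resls i _
  exact body_eq resls i

-- ===== VERDICT (by name: the statement is the Claim_ definition above) =====
theorem d_gram_spec : Claim_equal_d_gram := by
  intro lst _
  unfold Spec_d_gram d_gram d_gram_alt
  exact folds_eq lst []
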